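-- pv_equiv track=rewrite | github.com/dhermes/advent-of-code-2019 | day18/main4.py | consolidate_by_visited
-- ===== SOURCE A (Python) =====
-- def consolidate_by_visited(routes):
--     by_visited = {}
--     for route, distance in routes:
--         last_one = route[-1]
--         visited = tuple(sorted(route[:-1]))
--         key = (last_one, visited)
--
--         if key not in by_visited:
--             by_visited[key] = route, distance
--
--         _, compare_distance = by_visited[key]
--         if distance < compare_distance:
--             by_visited[key] = route, distance
--
--     return list(by_visited.values())
-- ===== SOURCE B (Python) =====
-- def consolidate_by_visited(routes):
--     grouped = {}
--     for route, distance in routes: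
--         key = (route[-1], tuple(sorted(route[:-1])))
--         grouped.setdefault(key, []).append((route, distance))
--     return [min(entries, key=lambda rd: rd[1]) for entries in grouped.values()]
-- ===== Notes on version B (the rewrite author's own statement) =====
-- stated objective: alternative
-- what changed: Replaces the online per-key min-update dict with a two-pass group-then-reduce: first pass groups all (route, distance) pairs by (last, sorted prefix) via setdefault/append, second pass takes min(entries, key=distance) per group; insertion order of first key occurrence and min's keep-earliest tie rule reproduce A's output exactly.
import Mathlib
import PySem

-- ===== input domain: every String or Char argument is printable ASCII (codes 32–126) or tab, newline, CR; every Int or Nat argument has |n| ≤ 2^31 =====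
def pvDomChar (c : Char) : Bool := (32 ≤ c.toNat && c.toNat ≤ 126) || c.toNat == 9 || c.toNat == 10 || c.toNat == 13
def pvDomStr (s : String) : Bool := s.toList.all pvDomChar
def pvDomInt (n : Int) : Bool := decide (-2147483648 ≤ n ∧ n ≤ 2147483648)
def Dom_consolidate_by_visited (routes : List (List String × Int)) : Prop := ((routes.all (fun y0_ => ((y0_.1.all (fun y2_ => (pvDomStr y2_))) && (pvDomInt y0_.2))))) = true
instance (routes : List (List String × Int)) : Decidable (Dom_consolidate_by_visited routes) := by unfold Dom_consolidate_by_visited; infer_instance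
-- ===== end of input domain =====

-- B replaces A's online per-key min-update with a group-all-then-reduce two-pass table (same cost, different decomposition); both Pythons raise IndexError on an empty route, excluded by Pre_.


-- ===== PORT A =====
-- key = (route[-1], tuple(sorted(route[:-1]))), identical in both Pythons; on an empty
-- route Python raises IndexError (excluded by Pre_), the port totalizes route[-1] with .getD "".
def pvKeyOf (route : List String) : String × List String :=
  ((PySem.List.pyGet? route (-1)).getD "",
   PySem.List.sorted (PySem.List.slice route none (some (-1))) (fun x => x) false)

-- loop body of A: insert if the key is new, then overwrite if strictly closer
def pvStepA (bv : PySem.Dict (String × List String) (List String × Int))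
    (rd : List String × Int) : PySem.Dict (String × List String) (List String × Int) :=
  let key := pvKeyOf rd.1
  let bv := if bv.contains key then bv else bv.insert key rd
  if rd.2 < (bv.getD key ([], 0)).2 then bv.insert key rd else bv

def consolidate_by_visited (routes : List (List String × Int)) : List (List String × Int) :=
  (routes.foldl pvStepA PySem.Dict.empty).values

-- ===== PORT B =====
-- loop body of B's first pass: grouped.setdefault(key, []).append((route, distance))
def pvStepB (g : PySem.Dict (String × List String) (List (List String × Int)))
    (rd : List String × Int) : PySem.Dict (String × List String) (List (List String × Int)) :=
  g.modify (pvKeyOf rd.1) [] (· ++ [rd])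

-- min(entries, key=lambda rd: rd[1]); entries is never empty where B applies this
def pvRed (es : List (List String × Int)) : List String × Int :=
  (PySem.List.min? es (fun rd => rd.2)).getD ([], 0)

def consolidate_by_visited_alt (routes : List (List String × Int)) : List (List String × Int) :=
  let grouped := routes.foldl pvStepB PySem.Dict.empty
  grouped.values.map pvRed

-- ===== PRECONDITION & SPEC =====
-- Pre_ excludes inputs containing an empty route: there Python A (and Python B) raises IndexError on route[-1].
def Pre_consolidate_by_visited (routes : List (List String × Int)) : Prop :=
  ∀ rd ∈ routes, rd.1 ≠ []
instance (routes : List (List String × Int)) : Decidable (Pre_consolidate_by_visited routes) := by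
  unfold Pre_consolidate_by_visited; infer_instance
def pvWitness_consolidate_by_visited : (List (List String × Int)) :=
  [(["a", "b"], 3), (["b"], 2), (["c", "b"], 1)]

def Spec_consolidate_by_visited (routes : List (List String × Int)) (out : List (List String × Int)) : Prop := out = consolidate_by_visited_alt routes
instance (routes : List (List String × Int)) (out : List (List String × Int)) : Decidable (Spec_consolidate_by_visited routes out) := by unfold Spec_consolidate_by_visited; infer_instance

-- ===== CLAIM (what is proved, stated in full; the proofs are below) =====
def Claim_equal_consolidate_by_visited : Prop := ∀ (routes : List (List String × Int)), Dom_consolidate_by_visited routes → Pre_consolidate_by_visited routes → Spec_consolidate_by_visited routes (consolidate_by_visited routes)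

-- ===== LEMMAS AND PROOFS =====

theorem pvRed_singleton (rd : List String × Int) : pvRed [rd] = rd := by
  simp [pvRed, PySem.List.min?]

-- first-min of an appended singleton is exactly A's online update step
theorem pvRed_append (es : List (List String × Int)) (rd : List String × Int) (hne : es ≠ []) :
    pvRed (es ++ [rd]) = if rd.2 < (pvRed es).2 then rd else pvRed es := by
  obtain ⟨m, hm⟩ : ∃ m, PySem.List.min? es (fun rd => rd.2) = some m := by
    cases h : PySem.List.min? es (fun rd => rd.2) with
    | none => exact absurd ((PySem.List.min?_eq_none_iff es _).mp h) hne
    | some m => exact ⟨m, rfl⟩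
  unfold pvRed
  simp only [PySem.List.min?, List.foldl_append] at *
  rw [hm]
  by_cases h : rd.2 < m.2 <;> simp [h]

-- in a dict with Nodup keys, two items with the same key are the same item
theorem pv_item_eq_of_key_eq {κ ν : Type} [BEq κ] (g : PySem.Dict κ ν)
    (hnd : g.keys.Nodup) {p q : κ × ν} (hp : p ∈ g.items) (hq : q ∈ g.items)
    (hk : p.1 = q.1) : p = q := by
  by_contra hne
  have hpw : g.items.Pairwise (fun a b => a.1 ≠ b.1) := by
    simpa [PySem.Dict.keys, List.Nodup, List.pairwise_map] using hnd
  exact absurd hk (List.Pairwise.forall (by tauto) hpw hp hq hne)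

-- one iteration preserves the items correspondence (A's dict = pvRed of B's groups)
theorem pv_step_items (d : PySem.Dict (String × List String) (List String × Int))
    (g : PySem.Dict (String × List String) (List (List String × Int)))
    (rd : List String × Int)
    (hI : d.items = g.items.map (fun p => (p.1, pvRed p.2)))
    (hnd : g.keys.Nodup) (hne : ∀ p ∈ g.items, p.2 ≠ []) :
    (pvStepA d rd).items = (pvStepB g rd).items.map (fun p => (p.1, pvRed p.2)) := by
  set k := pvKeyOf rd.1 with hkdef
  have hc : d.contains k = g.contains k := by
    simp [PySem.Dict.contains, hI, List.any_map]
    rfl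
  have hdk : d.keys = g.keys := by
    simp [PySem.Dict.keys, hI, List.map_map, Function.comp]
  by_cases hgc : g.contains k = true
  · -- key already present
    obtain ⟨p0, hp0, hk0⟩ : ∃ p0 ∈ g.items, p0.1 = k := by
      simp only [PySem.Dict.contains, List.any_eq_true, beq_iff_eq] at hgc
      exact hgc
    have hes : g.getD k [] = p0.2 := by
      have : (k, p0.2) ∈ g.items := by rwa [← hk0]
      exact PySem.Dict.getD_of_mem_items g this hnd []
    have hdg : d.getD k ([], 0) = pvRed p0.2 := by
      have hmem : (k, pvRed p0.2) ∈ d.items := by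
        rw [hI]
        exact List.mem_map.mpr ⟨p0, hp0, by rw [hk0]⟩
      exact PySem.Dict.getD_of_mem_items d hmem (by rw [hdk]; exact hnd) ([], 0)
    have hBitems : (pvStepB g rd).items
        = g.items.map (fun p => if p.1 == k then (k, p0.2 ++ [rd]) else p) := by
      simp only [pvStepB, PySem.Dict.modify, ← hkdef, hes]
      exact PySem.Dict.items_insert_of_contains g _ hgc
    have hcase := fun p (hp : p ∈ g.items) (hpk : p.1 = k) =>
      pv_item_eq_of_key_eq g hnd hp hp0 (hpk.trans hk0.symm)
    by_cases hlt : rd.2 < (pvRed p0.2).2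
    · -- strictly closer: overwrite in place
      have hA : (pvStepA d rd).items
          = d.items.map (fun p => if p.1 == k then (k, rd) else p) := by
        simp only [pvStepA, ← hkdef, hc, hgc, if_true, hdg, hlt]
        exact PySem.Dict.items_insert_of_contains d _ (by rw [hc]; exact hgc)
      rw [hA, hBitems, hI, List.map_map, List.map_map]
      refine List.map_congr_left (fun p hp => ?_)
      by_cases hpk : p.1 = k
      · have := hcase p hp hpk
        subst this
        simp [Function.comp, hpk, pvRed_append _ _ (hne p hp), hlt]
      · simp [Function.comp, hpk]
    · -- not closer: keep the stored route
      have hA : (pvStepA d rd).items = d.items := by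
        simp [pvStepA, ← hkdef, hc, hgc, hdg, hlt]
      rw [hA, hBitems, hI, List.map_map]
      refine List.map_congr_left (fun p hp => ?_)
      by_cases hpk : p.1 = k
      · have := hcase p hp hpk
        subst this
        simp [Function.comp, hpk, pvRed_append _ _ (hne p hp), hlt]
      · simp [Function.comp, hpk]
  · -- new key: both sides append
    have hgc' : g.contains k = false := by simpa using hgc
    have hdc : d.contains k = false := by rw [hc]; exact hgc'
    have hA : (pvStepA d rd).items = d.items ++ [(k, rd)] := by
      have hins : (d.insert k rd).getD k ([], 0) = rd := PySem.Dict.getD_insert_self d k rd ([], 0)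
      simp only [pvStepA, ← hkdef, hdc, Bool.false_eq_true, if_false, hins, lt_self_iff_false]
      exact PySem.Dict.items_insert_of_not_contains d _ hdc
    have hB : (pvStepB g rd).items = g.items ++ [(k, [rd])] := by
      simp only [pvStepB, PySem.Dict.modify, ← hkdef,
        PySem.Dict.getD_of_not_contains g [] hgc', List.nil_append]
      exact PySem.Dict.items_insert_of_not_contains g _ hgc'
    rw [hA, hB, hI]
    simp [pvRed_singleton]

theorem pv_stepB_nodup (g : PySem.Dict (String × List String) (List (List String × Int)))
    (rd : List String × Int) (hnd : g.keys.Nodup) : (pvStepB g rd).keys.Nodup :=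
  PySem.Dict.nodup_keys_insert g _ _ hnd

theorem pv_stepB_ne (g : PySem.Dict (String × List String) (List (List String × Int)))
    (rd : List String × Int) (hne : ∀ p ∈ g.items, p.2 ≠ []) :
    ∀ p ∈ (pvStepB g rd).items, p.2 ≠ [] := by
  intro p hp
  rcases (PySem.Dict.mem_items_insert _ _ _ _).mp hp with h | ⟨h, _⟩
  · subst h; simp
  · exact hne p h

theorem pv_fold_items (routes : List (List String × Int))
    (d : PySem.Dict (String × List String) (List String × Int))
    (g : PySem.Dict (String × List String) (List (List String × Int)))
    (hI : d.items = g.items.map (fun p => (p.1, pvRed p.2)))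
    (hnd : g.keys.Nodup) (hne : ∀ p ∈ g.items, p.2 ≠ []) :
    (routes.foldl pvStepA d).items = (routes.foldl pvStepB g).items.map (fun p => (p.1, pvRed p.2)) := by
  induction routes generalizing d g with
  | nil => simpa using hI
  | cons rd rest ih =>
    exact ih (pvStepA d rd) (pvStepB g rd) (pv_step_items d g rd hI hnd hne)
      (pv_stepB_nodup g rd hnd) (pv_stepB_ne g rd hne)

-- ===== VERDICT (by name: the statement is the Claim_ definition above) =====
theorem consolidate_by_visited_spec : Claim_equal_consolidate_by_visited := by
  intro routes _ _
  unfold Spec_consolidate_by_visited consolidate_by_visited consolidate_by_visited_alt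
  have h := pv_fold_items routes PySem.Dict.empty PySem.Dict.empty (by rfl)
    (by simp [PySem.Dict.keys, PySem.Dict.empty]) (by simp [PySem.Dict.empty])
  simp [PySem.Dict.values, h, Function.comp]
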